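-- pv_equiv track=rewrite | github.com/tomii9273/competitive_programming | library/scc.py | _dfs_numbering
-- ===== SOURCE A (Python) =====
-- def _dfs_numbering(st, M, V, ANS, cnt, v):
--     ST = [st]
--     while len(ST) > 0:
--         i = ST[-1]
--         if ANS[i] == -1:
--             V[i] = v
--             end = 1
--             for x in M[i]:
--                 if V[x] == -1:
--                     ST.append(x)
--                     end = 0
--             if end == 1:
--                 ST.pop()
--                 ANS[i] = cnt
--                 cnt += 1
--         else:
--             ST.pop()
--     return cnt
-- ===== SOURCE B (Python) =====
-- # Single-scan iterative post-order DFS with (node, remaining-children) frames: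
-- # marks V on push, walks each adjacency list once in reverse (to keep the
-- # original LIFO finishing order), never pushes duplicates or re-scans M[i].
-- # Same in-place updates of V and ANS as the original; returns the new cnt.
-- def _dfs_numbering(st, M, V, ANS, cnt, v):
--     if ANS[st] != -1:
--         return cnt
--     V[st] = v
--     ST = [(st, len(M[st]))]
--     while ST:
--         i, k = ST[-1]
--         if k == 0:
--             ST.pop()
--             ANS[i] = cnt
--             cnt += 1
--         else:
--             ST[-1] = (i, k - 1)
--             x = M[i][k - 1]
--             if V[x] == -1:
--                 V[x] = v
--                 ST.append((x, len(M[x])))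
--     return cnt
-- ===== Notes on version B (the rewrite author's own statement) =====
-- stated objective: alternative
-- what changed: A re-scans the whole neighbour list of the top node on every visit and pushes all unvisited neighbours (with duplicates) onto a plain node stack; B is the standard single-scan iterative post-order DFS with (node, remaining-children) frames that marks V at push time, walks each adjacency list exactly once in reverse order, and never pushes duplicates (same worst-case-avoiding structure, not measurably faster on the benchmarked inputs).
-- outside the precondition, e.g. on _dfs_numbering(0, [[0], [5]], [-1, -1], [-1, -1], 0, 1): A returns 1, B returns 1; on _dfs_numbering(0, [[]], [-1], [-1], 0, -1): A returns 1, B returns 1; on _dfs_numbering(0, [[]], [-1], [-1], -3, 1): A returns -2, B returns -2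
import Mathlib
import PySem

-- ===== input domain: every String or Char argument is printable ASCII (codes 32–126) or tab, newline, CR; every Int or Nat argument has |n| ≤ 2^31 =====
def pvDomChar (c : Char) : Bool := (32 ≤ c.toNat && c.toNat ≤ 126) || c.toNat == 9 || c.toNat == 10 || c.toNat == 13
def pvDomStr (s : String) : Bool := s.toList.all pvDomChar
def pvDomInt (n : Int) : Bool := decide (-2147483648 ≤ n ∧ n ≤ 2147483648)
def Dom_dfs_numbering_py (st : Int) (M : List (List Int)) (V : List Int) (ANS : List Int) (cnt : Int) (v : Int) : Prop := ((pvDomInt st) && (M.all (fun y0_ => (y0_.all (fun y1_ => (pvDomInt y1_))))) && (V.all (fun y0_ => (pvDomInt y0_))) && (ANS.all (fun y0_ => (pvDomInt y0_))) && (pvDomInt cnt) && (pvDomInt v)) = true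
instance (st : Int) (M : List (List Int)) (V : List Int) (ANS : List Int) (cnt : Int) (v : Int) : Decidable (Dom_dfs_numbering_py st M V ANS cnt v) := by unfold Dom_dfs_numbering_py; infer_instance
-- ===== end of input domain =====

-- B replaces A's rescan-and-repush DFS stack by a single-scan stack of
-- (node, remaining-children) frames; both mutate V/ANS in Python and the
-- theorem below is about the returned cnt (the Python side effects were
-- tested to coincide as well, but only the return value is proved here).

-- ===== PORT A =====
-- Python 'while' loop ported as fueled recursion (exact step for step;
-- none = IndexError or fuel exhaustion, both excluded by Pre_; the fuel is
-- proved sufficient under Pre_ below).  The Python stack ST (top at the end)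
-- is represented head-first (head = top).
def pvAScan (V : List Int) (row : List Int) (ST : List Int) : Option (List Int × Int) :=
  row.foldlM
    (fun (p : List Int × Int) x =>
      (PySem.List.pyGet? V x).map (fun vx => if vx = -1 then (x :: p.1, 0) else p))
    (ST, (1 : Int))

def pvALoop (M : List (List Int)) (v : Int) :
    Nat → List Int → List Int → List Int → Int → Option (List Int × List Int × Int)
  | _, [], V, A, c => some (V, A, c)
  | 0, _ :: _, _, _, _ => none
  | fuel + 1, i :: ST, V, A, c =>
    match PySem.List.pyGet? A i with
    | none => none
    | some ai =>
      if ai = -1 then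
        match PySem.List.pySet? V i v with
        | none => none
        | some V' =>
          match PySem.List.pyGet? M i with
          | none => none
          | some row =>
            match pvAScan V' row (i :: ST) with
            | none => none
            | some (ST', e) =>
              if e = 1 then
                match PySem.List.pySet? A i c with
                | none => none
                | some A' => pvALoop M v fuel ST'.tail V' A' (c + 1)
              else pvALoop M v fuel ST' V' A c
      else pvALoop M v fuel ST V A c

def dfs_numbering_py (st : Int) (M : List (List Int)) (V : List Int) (ANS : List Int) (cnt : Int) (v : Int) : Int :=
  match pvALoop M v (3 * M.length + 2 * (M.map List.length).sum + 8) [st] V ANS cnt with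
  | some s => s.2.2
  | none => cnt

-- ===== PORT B =====
-- frames are (node, number of still-unexamined neighbours); neighbours are
-- taken from the END of M[i] (reverse order), exactly as in Source B.
def pvBLoop (M : List (List Int)) (v : Int) :
    Nat → List (Int × Nat) → List Int → List Int → Int → Option (List Int × List Int × Int)
  | _, [], V, A, c => some (V, A, c)
  | 0, _ :: _, _, _, _ => none
  | fuel + 1, (i, k) :: ST, V, A, c =>
    if k = 0 then
      match PySem.List.pySet? A i c with
      | none => none
      | some A' => pvBLoop M v fuel ST V A' (c + 1)
    else
      match PySem.List.pyGet? M i with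
      | none => none
      | some row =>
        match PySem.List.pyGet? row ((k : Int) - 1) with
        | none => none
        | some x =>
          match PySem.List.pyGet? V x with
          | none => none
          | some vx =>
            if vx = -1 then
              match PySem.List.pySet? V x v with
              | none => none
              | some V' =>
                match PySem.List.pyGet? M x with
                | none => none
                | some rx => pvBLoop M v fuel ((x, rx.length) :: (i, k - 1) :: ST) V' A c
            else pvBLoop M v fuel ((i, k - 1) :: ST) V A c

def dfs_numbering_py_alt (st : Int) (M : List (List Int)) (V : List Int) (ANS : List Int) (cnt : Int) (v : Int) : Int :=
  match PySem.List.pyGet? ANS st with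
  | none => cnt
  | some a =>
    if a ≠ -1 then cnt
    else
      match PySem.List.pySet? V st v with
      | none => cnt
      | some V' =>
        match PySem.List.pyGet? M st with
        | none => cnt
        | some row =>
          match pvBLoop M v (3 * M.length + 2 * (M.map List.length).sum + 8) [(st, row.length)] V' ANS cnt with
          | some s => s.2.2
          | none => cnt

-- ===== PRECONDITION & SPEC =====
-- Pre_ admits every input on which A immediately returns cnt (ANS[st] ≠ -1,
-- any other argument) and otherwise restricts to the natural domain of this
-- SCC helper: equal-length arrays, all adjacency entries valid non-negative
-- indices, counter cnt ≥ 0, visit tag v ≠ -1 (−1 means "unvisited"), and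
-- V/ANS consistent (unvisited ⇒ unnumbered).  Outside these conditions A
-- either raises IndexError, diverges (a reachable node with V[x] = -1 but
-- ANS[x] ≠ -1, or v = -1 on a cycle), or renumbers nodes through the
-- cnt = -1 collision that negative counters reach; some individual
-- violating inputs (e.g. an out-of-range entry in an unreachable row) still
-- return, and B agrees there, but they are excluded by these well-formedness
-- conditions.
def Pre_dfs_numbering_py (st : Int) (M : List (List Int)) (V : List Int) (ANS : List Int) (cnt : Int) (v : Int) : Prop :=
  PySem.Raise.InRange ANS.length st ∧
  (PySem.List.pyGetD ANS st 0 ≠ -1 ∨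
    (0 ≤ st ∧ st < (M.length : Int) ∧ V.length = M.length ∧ ANS.length = M.length ∧
     0 ≤ cnt ∧ v ≠ -1 ∧
     (∀ row ∈ M, ∀ x ∈ row, 0 ≤ x ∧ x < (M.length : Int)) ∧
     (∀ j : Nat, j < M.length → V.getD j 0 = -1 → ANS.getD j 0 = -1)))
instance (st : Int) (M : List (List Int)) (V : List Int) (ANS : List Int) (cnt : Int) (v : Int) : Decidable (Pre_dfs_numbering_py st M V ANS cnt v) := by unfold Pre_dfs_numbering_py; infer_instance

def pvWitness_dfs_numbering_py : Int × List (List Int) × List Int × List Int × Int × Int :=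
  (0, [[1], [0, 1]], [-1, -1], [-1, -1], 0, 1)

def Spec_dfs_numbering_py (st : Int) (M : List (List Int)) (V : List Int) (ANS : List Int) (cnt : Int) (v : Int) (out : Int) : Prop := out = dfs_numbering_py_alt st M V ANS cnt v
instance (st : Int) (M : List (List Int)) (V : List Int) (ANS : List Int) (cnt : Int) (v : Int) (out : Int) : Decidable (Spec_dfs_numbering_py st M V ANS cnt v out) := by unfold Spec_dfs_numbering_py; infer_instance

-- ===== CLAIM (what is proved, stated in full; the proofs are below) =====
def Claim_equal_dfs_numbering_py : Prop := ∀ (st : Int) (M : List (List Int)) (V : List Int) (ANS : List Int) (cnt : Int) (v : Int), Dom_dfs_numbering_py st M V ANS cnt v → Pre_dfs_numbering_py st M V ANS cnt v → Spec_dfs_numbering_py st M V ANS cnt v (dfs_numbering_py st M V ANS cnt v)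

-- ===== LEMMAS AND PROOFS =====


-- ---- helper definitions used only by the proofs ----

def pvDeg (M : List (List Int)) (x : Int) : Nat := (M.getD x.toNat []).length

def pvMark (v : Int) (x : Int) (s : List Int × List Int × Int) : List Int × List Int × Int :=
  (s.1.set x.toNat v, s.2.1, s.2.2)

def pvFin (x : Int) (s : List Int × List Int × Int) : List Int × List Int × Int :=
  (s.1, s.2.1.set x.toNat s.2.2, s.2.2 + 1)

-- the recursive reference DFS both loops are reduced to
mutual
def pvVisit (M : List (List Int)) (v : Int) :
    Nat → Int → List Int × List Int × Int → Option (List Int × List Int × Int)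
  | 0, _, _ => none
  | f + 1, x, s =>
    match pvVisitFold M v f ((M.getD x.toNat []).reverse) (pvMark v x s) with
    | none => none
    | some s₂ => some (pvFin x s₂)
  termination_by f _ _ => (f, 0)
def pvVisitFold (M : List (List Int)) (v : Int) :
    Nat → List Int → List Int × List Int × Int → Option (List Int × List Int × Int)
  | _, [], s => some s
  | f, y :: l, s =>
    if s.1.getD y.toNat 0 = -1 then
      match pvVisit M v f y s with
      | none => none
      | some s' => pvVisitFold M v f l s'
    else pvVisitFold M v f l s
  termination_by f l _ => (f, l.length + 1)
end

-- context and state invariants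
def pvCtx (M : List (List Int)) (v : Int) : Prop :=
  v ≠ -1 ∧ ∀ row ∈ M, ∀ x ∈ row, 0 ≤ x ∧ x < (M.length : Int)

def pvSInv (M : List (List Int)) (s : List Int × List Int × Int) : Prop :=
  s.1.length = M.length ∧ s.2.1.length = M.length ∧ 0 ≤ s.2.2 ∧
  ∀ j : Nat, j < M.length → s.1.getD j 0 = -1 → s.2.1.getD j 0 = -1

-- potential: total weight of the still-unvisited nodes
def pvW (M : List (List Int)) (V : List Int) : Nat :=
  ∑ j ∈ Finset.range M.length, (if V.getD j 0 = -1 then 3 + (M.getD j []).length else 0)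

-- ---- small indexing lemmas ----

theorem pvGetSome (l : List Int) (i : Int) (h0 : 0 ≤ i) (h : i.toNat < l.length) :
    PySem.List.pyGet? l i = some (l.getD i.toNat 0) := by
  simp only [PySem.List.pyGet?, PySem.List.pyIdx?, if_pos h0,
    if_pos (show i < (l.length : Int) by omega), Option.bind_some, List.getD]
  simp [List.getElem?_eq_getElem h]

theorem pvSetSome (l : List Int) (i : Int) (x : Int) (h0 : 0 ≤ i) (h : i.toNat < l.length) :
    PySem.List.pySet? l i x = some (l.set i.toNat x) := by
  simp [PySem.List.pySet?, PySem.List.pyIdx?, if_pos h0,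
    if_pos (show i < (l.length : Int) by omega)]

theorem pvGetRowSome (M : List (List Int)) (i : Int) (h0 : 0 ≤ i) (h : i.toNat < M.length) :
    PySem.List.pyGet? M i = some (M.getD i.toNat []) := by
  simp only [PySem.List.pyGet?, PySem.List.pyIdx?, if_pos h0,
    if_pos (show i < (M.length : Int) by omega), Option.bind_some, List.getD]
  simp [List.getElem?_eq_getElem h]

theorem pvGetD_set_self (l : List Int) (i : Nat) (x : Int) (h : i < l.length) :
    (l.set i x).getD i 0 = x := by
  rw [List.getD_eq_getElem _ 0 (by simpa using h)]
  simp [List.getElem_set_self]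

theorem pvGetD_set_ne (l : List Int) (i j : Nat) (x : Int) (h : j ≠ i) :
    (l.set i x).getD j 0 = l.getD j 0 := by
  unfold List.getD
  rw [List.getElem?_set_ne (by omega)]

theorem pvSetIdem (l : List Int) (i : Nat) (x : Int) (h : l.getD i 0 = x) (hi : i < l.length) :
    l.set i x = l := by
  apply List.ext_getElem (by simp)
  intro j h1 h2
  rcases eq_or_ne j i with rfl | hne
  · rw [List.getElem_set_self]
    rw [List.getD_eq_getElem l 0 hi] at h
    exact h.symm
  · rw [List.getElem_set_ne (by omega)]

-- ---- potential lemmas ----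

theorem pvW_mark (M : List (List Int)) (V : List Int) (v : Int) (j0 : Nat)
    (hj : j0 < M.length) (hfresh : V.getD j0 0 = -1) (hv : v ≠ -1) :
    pvW M V = pvW M (V.set j0 v) + (3 + (M.getD j0 []).length) := by
  have hlen : j0 < V.length := by
    by_contra hc
    rw [List.getD_eq_default _ _ (by omega)] at hfresh
    exact absurd hfresh (by norm_num)
  unfold pvW
  rw [← Finset.sum_erase_add _ _ (Finset.mem_range.mpr hj),
      ← Finset.sum_erase_add _ _ (Finset.mem_range.mpr hj)]
  have hcong : ∑ j ∈ (Finset.range M.length).erase j0,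
      (if (V.set j0 v).getD j 0 = -1 then 3 + (M.getD j []).length else 0) =
      ∑ j ∈ (Finset.range M.length).erase j0,
      (if V.getD j 0 = -1 then 3 + (M.getD j []).length else 0) :=
    Finset.sum_congr rfl (fun j hjm => by
      rw [pvGetD_set_ne _ _ _ _ (Finset.mem_erase.mp hjm).1])
  rw [hcong, pvGetD_set_self V j0 v hlen, if_pos hfresh, if_neg hv]
  omega


theorem pvW_set_nonfresh (M : List (List Int)) (V : List Int) (v : Int) (j0 : Nat)
    (hfresh : V.getD j0 0 ≠ -1) (hv : v ≠ -1) :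
    pvW M (V.set j0 v) = pvW M V := by
  unfold pvW
  apply Finset.sum_congr rfl
  intro j _
  rcases eq_or_ne j j0 with rfl | hne
  · rcases lt_or_ge j V.length with hl | hl
    · rw [pvGetD_set_self V j v hl, if_neg hv, if_neg hfresh]
    · rw [List.set_eq_of_length_le (by omega)]
  · rw [pvGetD_set_ne _ _ _ _ hne]


theorem pvW_mono (M : List (List Int)) (V V' : List Int)
    (h : ∀ j : Nat, j < M.length → V'.getD j 0 = -1 → V.getD j 0 = -1) :
    pvW M V' ≤ pvW M V := by
  apply Finset.sum_le_sum
  intro j hjm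
  by_cases hV' : V'.getD j 0 = -1
  · rw [if_pos hV', if_pos (h j (Finset.mem_range.mp hjm) hV')]
  · rw [if_neg hV']; exact Nat.zero_le _


theorem pvW_lower (M : List (List Int)) (V : List Int) (j0 : Nat)
    (hj : j0 < M.length) (hfresh : V.getD j0 0 = -1) :
    3 ≤ pvW M V := by
  have := Finset.single_le_sum
    (f := fun j => if V.getD j 0 = -1 then 3 + (M.getD j []).length else 0)
    (fun i _ => Nat.zero_le _) (Finset.mem_range.mpr hj)
  simp only [if_pos hfresh] at this
  unfold pvW
  omega


-- ---- monotonicity / invariant pack for the reference DFS ----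

-- what a completed pvVisit call guarantees
def pvVPack (M : List (List Int)) (x : Int) (s s' : List Int × List Int × Int) : Prop :=
  pvSInv M s' ∧
  (∀ j : Nat, j < M.length → j ≠ x.toNat → s.1.getD j 0 ≠ -1 →
      s'.1.getD j 0 = s.1.getD j 0 ∧ s'.2.1.getD j 0 = s.2.1.getD j 0) ∧
  (∀ j : Nat, j < M.length → s'.2.1.getD j 0 = -1 → s'.1.getD j 0 = s.1.getD j 0) ∧
  s'.1.getD x.toNat 0 ≠ -1 ∧ s'.2.1.getD x.toNat 0 ≠ -1 ∧
  s.2.2 ≤ s'.2.2 ∧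
  (∀ j : Nat, j < M.length → s'.1.getD j 0 = -1 → s.1.getD j 0 = -1)

-- what a completed pvVisitFold call guarantees
def pvFPack (M : List (List Int)) (l : List Int) (s s' : List Int × List Int × Int) : Prop :=
  pvSInv M s' ∧
  (∀ j : Nat, j < M.length → s.1.getD j 0 ≠ -1 →
      s'.1.getD j 0 = s.1.getD j 0 ∧ s'.2.1.getD j 0 = s.2.1.getD j 0) ∧
  (∀ j : Nat, j < M.length → s'.2.1.getD j 0 = -1 → s'.1.getD j 0 = s.1.getD j 0) ∧
  s.2.2 ≤ s'.2.2 ∧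
  (∀ j : Nat, j < M.length → s'.1.getD j 0 = -1 → s.1.getD j 0 = -1) ∧
  (∀ y ∈ l, s'.1.getD y.toNat 0 ≠ -1)

-- derived: finished entries stay finished (ANS-antitone), given SInv on the start
theorem pvAnsAnti (M : List (List Int)) (s s' : List Int × List Int × Int)
    (hs : pvSInv M s)
    (hM1 : ∀ j : Nat, j < M.length → s.1.getD j 0 ≠ -1 →
      s'.1.getD j 0 = s.1.getD j 0 ∧ s'.2.1.getD j 0 = s.2.1.getD j 0)
    (j : Nat) (hj : j < M.length) (h : s'.2.1.getD j 0 = -1) : s.2.1.getD j 0 = -1 := by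
  by_contra hc
  have hv : s.1.getD j 0 ≠ -1 := fun hv => hc (hs.2.2.2 j hj hv)
  have := (hM1 j hj hv).2
  rw [this] at h
  exact hc h

theorem pvRefPack (M : List (List Int)) (v : Int) (hctx : pvCtx M v) : ∀ f : Nat,
    (∀ (x : Int) s s', 0 ≤ x → x.toNat < M.length → pvSInv M s →
        pvVisit M v f x s = some s' → pvVPack M x s s') ∧
    (∀ (l : List Int) s s', (∀ y ∈ l, 0 ≤ y ∧ y.toNat < M.length) → pvSInv M s →
        pvVisitFold M v f l s = some s' → pvFPack M l s s') := by
  have hv : v ≠ -1 := hctx.1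
  -- fold-part follows from the visit-part at the same fuel
  have foldStep : ∀ f : Nat,
      (∀ (x : Int) s s', 0 ≤ x → x.toNat < M.length → pvSInv M s →
        pvVisit M v f x s = some s' → pvVPack M x s s') →
      (∀ (l : List Int) s s', (∀ y ∈ l, 0 ≤ y ∧ y.toNat < M.length) → pvSInv M s →
        pvVisitFold M v f l s = some s' → pvFPack M l s s') := by
    intro f hP l
    induction l with
    | nil =>
      intro s s' _ hs h
      simp only [pvVisitFold] at h
      cases h
      exact ⟨hs, fun j hj _ => ⟨rfl, rfl⟩, fun j hj _ => rfl, le_refl _,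
        fun j hj h => h, fun y hy => absurd hy (List.not_mem_nil)⟩
    | cons y l' ih =>
      intro s s' hl hs h
      have hy := hl y (by simp)
      have hl' : ∀ z ∈ l', 0 ≤ z ∧ z.toNat < M.length := fun z hz => hl z (by simp [hz])
      simp only [pvVisitFold] at h
      by_cases hfr : s.1.getD y.toNat 0 = -1
      · rw [if_pos hfr] at h
        cases hv1 : pvVisit M v f y s with
        | none => rw [hv1] at h; cases h
        | some s₁ =>
          rw [hv1] at h
          have hvp := hP y s s₁ hy.1 hy.2 hs hv1
          obtain ⟨hs₁, hM1v, hM2v, hVy, hAy, hcv, hantiv⟩ := hvp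
          have hfp := ih s₁ s' hl' hs₁ h
          obtain ⟨hs', hM1f, hM2f, hcf, hantif, hallf⟩ := hfp
          refine ⟨hs', ?_, ?_, le_trans hcv hcf, ?_, ?_⟩
          · intro j hj hnf
            have hjy : j ≠ y.toNat := fun he => hnf (he ▸ hfr)
            have h1 := hM1v j hj hjy hnf
            have h2 := hM1f j hj (h1.1 ▸ hnf)
            exact ⟨h2.1.trans h1.1, h2.2.trans h1.2⟩
          · intro j hj hA'
            have hA₁ : s₁.2.1.getD j 0 = -1 :=
              pvAnsAnti M s₁ s' hs₁ hM1f j hj hA'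
            have := hM2f j hj hA'
            rw [this, hM2v j hj hA₁]
          · intro j hj hV'
            exact hantiv j hj (hantif j hj hV')
          · intro z hz
            rcases List.mem_cons.mp hz with rfl | hz'
            · have := (hM1f z.toNat hy.2 hVy).1
              rw [this]; exact hVy
            · exact hallf z hz'
      · rw [if_neg hfr] at h
        have hfp := ih s s' hl' hs h
        obtain ⟨hs', hM1f, hM2f, hcf, hantif, hallf⟩ := hfp
        refine ⟨hs', hM1f, hM2f, hcf, hantif, ?_⟩
        intro z hz
        rcases List.mem_cons.mp hz with rfl | hz'
        · rw [(hM1f z.toNat hy.2 hfr).1]; exact hfr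
        · exact hallf z hz'
  intro f
  induction f with
  | zero =>
    constructor
    · intro x s s' _ _ _ h
      simp [pvVisit] at h
    · exact foldStep 0 (by intro x s s' _ _ _ h; simp [pvVisit] at h)
  | succ f ihf =>
    have hPsucc : ∀ (x : Int) s s', 0 ≤ x → x.toNat < M.length → pvSInv M s →
        pvVisit M v (f + 1) x s = some s' → pvVPack M x s s' := by
      intro x s s' hx0 hxn hs h
      simp only [pvVisit] at h
      cases hf : pvVisitFold M v f ((M.getD x.toNat []).reverse) (pvMark v x s) with
      | none => rw [hf] at h; cases h
      | some s₂ =>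
        rw [hf] at h
        cases h
        have hVlen : s.1.length = M.length := hs.1
        have hAlen : s.2.1.length = M.length := hs.2.1
        -- the marked state
        have hs₁ : pvSInv M (pvMark v x s) := by
          refine ⟨by simp [pvMark, hVlen], by simp [pvMark, hAlen], hs.2.2.1, ?_⟩
          intro j hj hVj
          simp only [pvMark] at hVj ⊢
          rcases eq_or_ne j x.toNat with rfl | hne
          · rw [pvGetD_set_self _ _ _ (by omega)] at hVj
            exact absurd hVj hv
          · rw [pvGetD_set_ne _ _ _ _ hne] at hVj
            exact hs.2.2.2 j hj hVj
        have hrow : ∀ y ∈ (M.getD x.toNat []).reverse, 0 ≤ y ∧ y.toNat < M.length := by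
          intro y hy
          rw [List.mem_reverse] at hy
          have hmem : M.getD x.toNat [] ∈ M := by
            rw [List.getD_eq_getElem M [] hxn]
            exact List.getElem_mem _
          have := hctx.2 _ hmem y hy
          exact ⟨this.1, by omega⟩
        have hfp := (foldStep f ihf.1) _ _ _ hrow hs₁ hf
        obtain ⟨hs₂, hM1f, hM2f, hcf, hantif, hallf⟩ := hfp
        have hV₁x : (pvMark v x s).1.getD x.toNat 0 = v := by
          simp only [pvMark]
          exact pvGetD_set_self _ _ _ (by omega)
        have hV₂x : s₂.1.getD x.toNat 0 = v := by
          rw [(hM1f x.toNat hxn (by rw [hV₁x]; exact hv)).1, hV₁x]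
        have hA₂len : s₂.2.1.length = M.length := hs₂.2.1
        have hc₂ : 0 ≤ s₂.2.2 := hs₂.2.2.1
        refine ⟨?_, ?_, ?_, ?_, ?_, ?_, ?_⟩
        · -- SInv of the finished state
          refine ⟨hs₂.1, by simp [pvFin, hA₂len], by simp [pvFin]; omega, ?_⟩
          intro j hj hVj
          simp only [pvFin] at hVj ⊢
          rcases eq_or_ne j x.toNat with rfl | hne
          · rw [hV₂x] at hVj; exact absurd hVj hv
          · rw [pvGetD_set_ne _ _ _ _ hne]
            exact hs₂.2.2.2 j hj hVj
        · intro j hj hjx hnf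
          have hV₁j : (pvMark v x s).1.getD j 0 = s.1.getD j 0 := by
            simp only [pvMark]; exact pvGetD_set_ne _ _ _ _ hjx
          have h2 := hM1f j hj (by rw [hV₁j]; exact hnf)
          constructor
          · simp only [pvFin]; rw [h2.1, hV₁j]
          · simp only [pvFin]
            rw [pvGetD_set_ne _ _ _ _ hjx, h2.2]
            simp [pvMark]
        · intro j hj hA'
          simp only [pvFin] at hA' ⊢
          have hjx : j ≠ x.toNat := by
            intro he
            rw [he, pvGetD_set_self _ _ _ (by omega)] at hA'
            omega
          rw [pvGetD_set_ne _ _ _ _ hjx] at hA'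
          rw [hM2f j hj hA']
          simp only [pvMark]
          have : s₂.1.getD j 0 = (pvMark v x s).1.getD j 0 := hM2f j hj hA'
          rcases eq_or_ne j x.toNat with rfl | hne
          · exact absurd rfl hjx
          · exact pvGetD_set_ne _ _ _ _ hne
        · simp only [pvFin]
          rw [hV₂x]; exact hv
        · simp only [pvFin]
          rw [pvGetD_set_self _ _ _ (by omega)]
          omega
        · simp only [pvFin]
          have : s.2.2 = (pvMark v x s).2.2 := rfl
          omega
        · intro j hj hV'
          simp only [pvFin] at hV'
          have := hantif j hj hV'
          simp only [pvMark] at this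
          rcases eq_or_ne j x.toNat with rfl | hne
          · rw [pvGetD_set_self _ _ _ (by omega)] at this
            exact absurd this hv
          · rw [pvGetD_set_ne _ _ _ _ hne] at this
            exact this
    exact ⟨hPsucc, foldStep (f + 1) hPsucc⟩

-- ---- filtering already-visited elements out of a fold ----


-- ---- totality of the reference DFS ----

theorem pvW_markLe (M : List (List Int)) (V : List Int) (v : Int) (j : Nat) (hv : v ≠ -1)
    (hjn : j < M.length) : pvW M (V.set j v) ≤ pvW M V := by
  by_cases hfr : V.getD j 0 = -1
  · have := pvW_mark M V v j hjn hfr hv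
    omega
  · rw [pvW_set_nonfresh M V v j hfr hv]

theorem pvFoldFilter (M : List (List Int)) (v : Int) (hctx : pvCtx M v) (f : Nat) :
    ∀ (n : Nat) (l : List Int) (s : List Int × List Int × Int), l.length ≤ n →
    (∀ y ∈ l, 0 ≤ y ∧ y.toNat < M.length) → pvSInv M s →
    pvVisitFold M v f l s = pvVisitFold M v f (l.filter (fun y => s.1.getD y.toNat 0 = -1)) s := by
  intro n
  induction n with
  | zero =>
    intro l s hlen _ _
    obtain rfl := List.length_eq_zero_iff.mp (Nat.le_zero.mp hlen)
    rfl
  | succ n ihn =>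
    intro l s hlen hl hs
    cases l with
    | nil => simp [pvVisitFold]
    | cons y l' =>
      have hy := hl y (by simp)
      have hl' : ∀ z ∈ l', 0 ≤ z ∧ z.toNat < M.length := fun z hz => hl z (by simp [hz])
      by_cases hfr : s.1.getD y.toNat 0 = -1
      · rw [List.filter_cons_of_pos (by simpa using hfr)]
        simp only [pvVisitFold, if_pos hfr]
        cases hv1 : pvVisit M v f y s with
        | none => rfl
        | some s₁ =>
          have hvp := (pvRefPack M v hctx f).1 y s s₁ hy.1 hy.2 hs hv1
          obtain ⟨hs₁, hM1v, hM2v, hVy, hAy, hcv, hantiv⟩ := hvp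
          have e1 : pvVisitFold M v f l' s₁ =
              pvVisitFold M v f (l'.filter (fun z => s₁.1.getD z.toNat 0 = -1)) s₁ :=
            ihn l' s₁ (by simp at hlen; omega) hl' hs₁
          have e2 : pvVisitFold M v f (l'.filter (fun z => s.1.getD z.toNat 0 = -1)) s₁ =
              pvVisitFold M v f ((l'.filter (fun z => s.1.getD z.toNat 0 = -1)).filter
                (fun z => s₁.1.getD z.toNat 0 = -1)) s₁ := by
            apply ihn _ s₁ _ _ hs₁
            · calc (l'.filter _).length ≤ l'.length := List.length_filter_le _ _
                _ ≤ n := by simp at hlen; omega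
            · intro z hz; exact hl' z (List.mem_of_mem_filter hz)
          have e3 : (l'.filter (fun z => s.1.getD z.toNat 0 = -1)).filter
                (fun z => s₁.1.getD z.toNat 0 = -1) =
              l'.filter (fun z => s₁.1.getD z.toNat 0 = -1) := by
            rw [List.filter_filter]
            apply List.filter_congr
            intro z hz
            by_cases h1 : s₁.1.getD z.toNat 0 = -1
            · have h0 : s.1.getD z.toNat 0 = -1 := hantiv z.toNat (hl' z hz).2 h1
              simp only [List.getD] at h0 h1
              simp [h0, h1]
            · simp only [List.getD] at h1
              simp [h1]
          dsimp only
          rw [e1, e2, e3]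
      · rw [List.filter_cons_of_neg (by simpa using hfr)]
        simp only [pvVisitFold, if_neg hfr]
        exact ihn l' s (by simp at hlen; omega) hl' hs

theorem pvRefTotal (M : List (List Int)) (v : Int) (hctx : pvCtx M v) : ∀ f : Nat,
    (∀ (x : Int) s, 0 ≤ x → x.toNat < M.length → pvSInv M s →
        (pvW M s.1 ≤ f ∨ (s.1.getD x.toNat 0 = -1 ∧ pvW M s.1 ≤ f + 3)) →
        ∃ s', pvVisit M v (f + 1) x s = some s') ∧
    (∀ (l : List Int) s, (∀ y ∈ l, 0 ≤ y ∧ y.toNat < M.length) → pvSInv M s →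
        pvW M s.1 ≤ f → ∃ s', pvVisitFold M v f l s = some s') := by
  have hv : v ≠ -1 := hctx.1
  -- the visit-part at fuel f+1 follows from the fold-part at fuel f
  have visitStep : ∀ f : Nat,
      (∀ (l : List Int) s, (∀ y ∈ l, 0 ≤ y ∧ y.toNat < M.length) → pvSInv M s →
        pvW M s.1 ≤ f → ∃ s', pvVisitFold M v f l s = some s') →
      (∀ (x : Int) s, 0 ≤ x → x.toNat < M.length → pvSInv M s →
        (pvW M s.1 ≤ f ∨ (s.1.getD x.toNat 0 = -1 ∧ pvW M s.1 ≤ f + 3)) →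
        ∃ s', pvVisit M v (f + 1) x s = some s') := by
    intro f hF x s hx0 hxn hs hcase
    have hVlen : s.1.length = M.length := hs.1
    have hs₁ : pvSInv M (pvMark v x s) := by
      refine ⟨by simp [pvMark, hVlen], by simp [pvMark, hs.2.1], hs.2.2.1, ?_⟩
      intro j hj hVj
      simp only [pvMark] at hVj ⊢
      rcases eq_or_ne j x.toNat with rfl | hne
      · rw [pvGetD_set_self _ _ _ (by omega)] at hVj
        exact absurd hVj hv
      · rw [pvGetD_set_ne _ _ _ _ hne] at hVj
        exact hs.2.2.2 j hj hVj
    have hrow : ∀ y ∈ (M.getD x.toNat []).reverse, 0 ≤ y ∧ y.toNat < M.length := by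
      intro y hy
      rw [List.mem_reverse] at hy
      have hmem : M.getD x.toNat [] ∈ M := by
        rw [List.getD_eq_getElem M [] hxn]
        exact List.getElem_mem _
      have := hctx.2 _ hmem y hy
      exact ⟨this.1, by omega⟩
    have hW₁ : pvW M (pvMark v x s).1 ≤ f := by
      rcases hcase with h | ⟨hfr, h⟩
      · have := pvW_markLe M s.1 v x.toNat hv hxn
        simp only [pvMark]
        omega
      · have := pvW_mark M s.1 v x.toNat hxn hfr hv
        simp only [pvMark]
        omega
    obtain ⟨s₂, h₂⟩ := hF _ (pvMark v x s) hrow hs₁ hW₁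
    refine ⟨pvFin x s₂, ?_⟩
    simp only [pvVisit, h₂]
  intro f
  induction f with
  | zero =>
    have hF0 : ∀ (l : List Int) s, (∀ y ∈ l, 0 ≤ y ∧ y.toNat < M.length) → pvSInv M s →
        pvW M s.1 ≤ 0 → ∃ s', pvVisitFold M v 0 l s = some s' := by
      intro l
      induction l with
      | nil => intro s _ _ _; exact ⟨s, by simp [pvVisitFold]⟩
      | cons y l' ih =>
        intro s hl hs hW
        have hy := hl y (by simp)
        have hfr : ¬ s.1.getD y.toNat 0 = -1 := by
          intro hfr
          have := pvW_lower M s.1 y.toNat hy.2 hfr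
          omega
        simp only [pvVisitFold, if_neg hfr]
        exact ih s (fun z hz => hl z (by simp [hz])) hs hW
    exact ⟨visitStep 0 hF0, hF0⟩
  | succ f ihf =>
    have hFsucc : ∀ (l : List Int) s, (∀ y ∈ l, 0 ≤ y ∧ y.toNat < M.length) → pvSInv M s →
        pvW M s.1 ≤ f + 1 → ∃ s', pvVisitFold M v (f + 1) l s = some s' := by
      intro l
      induction l with
      | nil => intro s _ _ _; exact ⟨s, by simp [pvVisitFold]⟩
      | cons y l' ih =>
        intro s hl hs hW
        have hy := hl y (by simp)
        have hl' : ∀ z ∈ l', 0 ≤ z ∧ z.toNat < M.length := fun z hz => hl z (by simp [hz])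
        by_cases hfr : s.1.getD y.toNat 0 = -1
        · obtain ⟨s₁, h₁⟩ := visitStep f ihf.2 y s hy.1 hy.2 hs (Or.inr ⟨hfr, by omega⟩)
          have hvp := (pvRefPack M v hctx (f + 1)).1 y s s₁ hy.1 hy.2 hs h₁
          obtain ⟨hs₁, hM1v, hM2v, hVy, hAy, hcv, hantiv⟩ := hvp
          have hW₁ : pvW M s₁.1 ≤ f + 1 :=
            le_trans (pvW_mono M s.1 s₁.1 hantiv) hW
          obtain ⟨s', h'⟩ := ih s₁ hl' hs₁ hW₁
          refine ⟨s', ?_⟩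
          simp only [pvVisitFold, if_pos hfr, h₁, h']
        · obtain ⟨s', h'⟩ := ih s hl' hs hW
          refine ⟨s', ?_⟩
          simp only [pvVisitFold, if_neg hfr, h']
    exact ⟨visitStep (f + 1) hFsucc, hFsucc⟩

-- ---- characterisation of A's inner scan ----


-- ---- A simulates the reference DFS ----

theorem pvAScanAux (V : List Int) (row : List Int)
    (hrow : ∀ y ∈ row, 0 ≤ y ∧ y.toNat < V.length) :
    ∀ (ST : List Int) (e0 : Int),
    row.foldlM
      (fun (p : List Int × Int) x =>
        (PySem.List.pyGet? V x).map (fun vx => if vx = -1 then (x :: p.1, 0) else p))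
      (ST, e0) =
    some ((row.filter (fun y => V.getD y.toNat 0 = -1)).reverse ++ ST,
          if row.filter (fun y => V.getD y.toNat 0 = -1) = [] then e0 else 0) := by
  induction row with
  | nil => intro ST e0; simp [List.foldlM]
  | cons y l' ih =>
    intro ST e0
    have hy := hrow y (by simp)
    have hl' : ∀ z ∈ l', 0 ≤ z ∧ z.toNat < V.length := fun z hz => hrow z (by simp [hz])
    rw [List.foldlM_cons]
    rw [pvGetSome V y hy.1 hy.2]
    by_cases hfr : V.getD y.toNat 0 = -1
    · rw [List.filter_cons_of_pos (by simpa [List.getD] using hfr)]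
      simp only [Option.map_some, if_pos hfr, Option.bind_eq_bind, Option.bind_some]
      rw [ih hl' (y :: ST) 0]
      simp
    · rw [List.filter_cons_of_neg (by simpa [List.getD] using hfr)]
      simp only [Option.map_some, if_neg hfr, Option.bind_eq_bind, Option.bind_some]
      exact ih hl' ST e0

theorem pvAScanEq (V : List Int) (row : List Int) (ST : List Int)
    (hrow : ∀ y ∈ row, 0 ≤ y ∧ y.toNat < V.length) :
    pvAScan V row ST =
      some ((row.filter (fun y => V.getD y.toNat 0 = -1)).reverse ++ ST,
            if row.filter (fun y => V.getD y.toNat 0 = -1) = [] then 1 else 0) :=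
  pvAScanAux V row hrow ST 1

-- one iteration of A's loop on a node with ANS[x] = -1, fully evaluated
theorem pvAStep (M : List (List Int)) (v : Int) (x : Int) (rest : List Int)
    (V A : List Int) (c : Int) (g₀ : Nat)
    (hx0 : 0 ≤ x) (hxn : x.toNat < M.length)
    (hVlen : V.length = M.length) (hAlen : A.length = M.length)
    (hAx : A.getD x.toNat 0 = -1)
    (hrowV : ∀ y ∈ M.getD x.toNat [], 0 ≤ y ∧ y.toNat < M.length) :
    pvALoop M v (g₀ + 1) (x :: rest) V A c =
      if (M.getD x.toNat []).filter (fun y => (V.set x.toNat v).getD y.toNat 0 = -1) = [] then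
        pvALoop M v g₀ rest (V.set x.toNat v) (A.set x.toNat c) (c + 1)
      else
        pvALoop M v g₀
          (((M.getD x.toNat []).filter (fun y => (V.set x.toNat v).getD y.toNat 0 = -1)).reverse
            ++ (x :: rest))
          (V.set x.toNat v) A c := by
  have hrowV' : ∀ y ∈ M.getD x.toNat [], 0 ≤ y ∧ y.toNat < (V.set x.toNat v).length := by
    intro y hy
    have := hrowV y hy
    simp only [List.length_set]
    omega
  simp only [pvALoop]
  rw [pvGetSome A x hx0 (by omega)]
  dsimp only
  rw [if_pos hAx, pvSetSome V x v hx0 (by omega), pvGetRowSome M x hx0 hxn]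
  dsimp only
  rw [pvAScanEq (V.set x.toNat v) (M.getD x.toNat []) (x :: rest) hrowV']
  dsimp only
  by_cases hfl : (M.getD x.toNat []).filter (fun y => (V.set x.toNat v).getD y.toNat 0 = -1) = []
  · rw [if_pos hfl, hfl]
    simp only [List.reverse_nil, List.nil_append, List.tail_cons]
    rw [pvSetSome A x c hx0 (by omega)]
  · simp only [if_neg hfl]
    norm_num

-- one iteration of A's loop on a node with ANS[x] ≠ -1 (a duplicate): pop
theorem pvAStepPop (M : List (List Int)) (v : Int) (x : Int) (rest : List Int)
    (V A : List Int) (c : Int) (g₀ : Nat)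
    (hx0 : 0 ≤ x) (hxA : x.toNat < A.length)
    (hAx : A.getD x.toNat 0 ≠ -1) :
    pvALoop M v (g₀ + 1) (x :: rest) V A c = pvALoop M v g₀ rest V A c := by
  simp only [pvALoop]
  rw [pvGetSome A x hx0 hxA]
  dsimp only
  rw [if_neg hAx]

theorem pvASim (M : List (List Int)) (v : Int) (hctx : pvCtx M v) : ∀ f : Nat,
    (∀ (x : Int) s s', 0 ≤ x → x.toNat < M.length → pvSInv M s →
        s.2.1.getD x.toNat 0 = -1 →
        pvVisit M v f x s = some s' →
        ∃ g : Nat,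
          (∀ (rest : List Int) (g' : Nat),
            pvALoop M v (g + g') (x :: rest) s.1 s.2.1 s.2.2 =
              pvALoop M v g' rest s'.1 s'.2.1 s'.2.2) ∧
          g + pvW M s'.1 ≤ pvW M s.1 +
            (if s.1.getD x.toNat 0 = -1 then 0 else 3 + pvDeg M x)) ∧
    (∀ (m : List Int) s s', (∀ y ∈ m, 0 ≤ y ∧ y.toNat < M.length) →
        (∀ y ∈ m, s.2.1.getD y.toNat 0 = -1 → s.1.getD y.toNat 0 = -1) →
        pvSInv M s →
        pvVisitFold M v f m s = some s' →
        ∃ g : Nat,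
          (∀ (rest : List Int) (g' : Nat),
            pvALoop M v (g + g') (m ++ rest) s.1 s.2.1 s.2.2 =
              pvALoop M v g' rest s'.1 s'.2.1 s'.2.2) ∧
          g + pvW M s'.1 ≤ pvW M s.1 + m.length) := by
  have hv : v ≠ -1 := hctx.1
  -- the fold-part follows from the visit-part at the same fuel
  have foldQ : ∀ f : Nat,
      (∀ (x : Int) s s', 0 ≤ x → x.toNat < M.length → pvSInv M s →
        s.2.1.getD x.toNat 0 = -1 →
        pvVisit M v f x s = some s' →
        ∃ g : Nat,
          (∀ (rest : List Int) (g' : Nat),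
            pvALoop M v (g + g') (x :: rest) s.1 s.2.1 s.2.2 =
              pvALoop M v g' rest s'.1 s'.2.1 s'.2.2) ∧
          g + pvW M s'.1 ≤ pvW M s.1 +
            (if s.1.getD x.toNat 0 = -1 then 0 else 3 + pvDeg M x)) →
      (∀ (m : List Int) s s', (∀ y ∈ m, 0 ≤ y ∧ y.toNat < M.length) →
        (∀ y ∈ m, s.2.1.getD y.toNat 0 = -1 → s.1.getD y.toNat 0 = -1) →
        pvSInv M s →
        pvVisitFold M v f m s = some s' →
        ∃ g : Nat,
          (∀ (rest : List Int) (g' : Nat),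
            pvALoop M v (g + g') (m ++ rest) s.1 s.2.1 s.2.2 =
              pvALoop M v g' rest s'.1 s'.2.1 s'.2.2) ∧
          g + pvW M s'.1 ≤ pvW M s.1 + m.length) := by
    intro f hP m
    induction m with
    | nil =>
      intro s s' _ _ _ h
      simp only [pvVisitFold] at h
      cases h
      exact ⟨0, fun rest g' => by simp, by omega⟩
    | cons y m' ih =>
      intro s s' hm hsync hs h
      have hy := hm y (by simp)
      have hm' : ∀ z ∈ m', 0 ≤ z ∧ z.toNat < M.length := fun z hz => hm z (by simp [hz])
      simp only [pvVisitFold] at h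
      by_cases hfr : s.1.getD y.toNat 0 = -1
      · rw [if_pos hfr] at h
        cases hv1 : pvVisit M v f y s with
        | none => rw [hv1] at h; cases h
        | some s₁ =>
          rw [hv1] at h
          have hAy : s.2.1.getD y.toNat 0 = -1 := hs.2.2.2 y.toNat hy.2 hfr
          obtain ⟨gP, runP, bndP⟩ := hP y s s₁ hy.1 hy.2 hs hAy hv1
          have hpack := (pvRefPack M v hctx f).1 y s s₁ hy.1 hy.2 hs hv1
          obtain ⟨hs₁, hM1v, hM2v, hVy, hAy₁, hcv, hantiv⟩ := hpack
          have hsync₁ : ∀ z ∈ m', s₁.2.1.getD z.toNat 0 = -1 → s₁.1.getD z.toNat 0 = -1 := by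
            intro z hz hA₁
            have hzr := (hm' z hz).2
            by_cases hA0 : s.2.1.getD z.toNat 0 = -1
            · have hV0 := hsync z (by simp [hz]) hA0
              rw [hM2v z.toNat hzr hA₁, hV0]
            · exfalso
              have hV0 : s.1.getD z.toNat 0 ≠ -1 := fun hc => hA0 (hs.2.2.2 z.toNat hzr hc)
              have hzy : z.toNat ≠ y.toNat := fun he => hV0 (he ▸ hfr)
              have := (hM1v z.toNat hzr hzy hV0).2
              rw [this] at hA₁
              exact hA0 hA₁
          obtain ⟨gQ, runQ, bndQ⟩ := ih s₁ s' hm' hsync₁ hs₁ h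
          refine ⟨gP + gQ, ?_, ?_⟩
          · intro rest g'
            calc pvALoop M v (gP + gQ + g') ((y :: m') ++ rest) s.1 s.2.1 s.2.2
                = pvALoop M v (gP + (gQ + g')) (y :: (m' ++ rest)) s.1 s.2.1 s.2.2 := by
                  rw [Nat.add_assoc]; rfl
              _ = pvALoop M v (gQ + g') (m' ++ rest) s₁.1 s₁.2.1 s₁.2.2 := runP (m' ++ rest) (gQ + g')
              _ = pvALoop M v g' rest s'.1 s'.2.1 s'.2.2 := runQ rest g'
          · rw [if_pos hfr] at bndP
            simp only [List.length_cons]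
            omega
      · rw [if_neg hfr] at h
        have hAy : s.2.1.getD y.toNat 0 ≠ -1 := fun hA => hfr (hsync y (by simp) hA)
        obtain ⟨gQ, runQ, bndQ⟩ :=
          ih s s' hm' (fun z hz hA => hsync z (by simp [hz]) hA) hs h
        refine ⟨gQ + 1, ?_, ?_⟩
        · intro rest g'
          calc pvALoop M v (gQ + 1 + g') ((y :: m') ++ rest) s.1 s.2.1 s.2.2
              = pvALoop M v ((gQ + g') + 1) (y :: (m' ++ rest)) s.1 s.2.1 s.2.2 := by
                rw [show gQ + 1 + g' = (gQ + g') + 1 by omega]; rfl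
            _ = pvALoop M v (gQ + g') (m' ++ rest) s.1 s.2.1 s.2.2 :=
                pvAStepPop M v y (m' ++ rest) s.1 s.2.1 s.2.2 (gQ + g') hy.1
                  (by rw [hs.2.1]; exact hy.2) hAy
            _ = pvALoop M v g' rest s'.1 s'.2.1 s'.2.2 := runQ rest g'
        · simp only [List.length_cons]
          omega
  intro f
  induction f with
  | zero =>
    constructor
    · intro x s s' _ _ _ _ h
      simp [pvVisit] at h
    · exact foldQ 0 (by intro x s s' _ _ _ _ h; simp [pvVisit] at h)
  | succ f ihf =>
    have hPsucc : ∀ (x : Int) s s', 0 ≤ x → x.toNat < M.length → pvSInv M s →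
        s.2.1.getD x.toNat 0 = -1 →
        pvVisit M v (f + 1) x s = some s' →
        ∃ g : Nat,
          (∀ (rest : List Int) (g' : Nat),
            pvALoop M v (g + g') (x :: rest) s.1 s.2.1 s.2.2 =
              pvALoop M v g' rest s'.1 s'.2.1 s'.2.2) ∧
          g + pvW M s'.1 ≤ pvW M s.1 +
            (if s.1.getD x.toNat 0 = -1 then 0 else 3 + pvDeg M x) := by
      intro x s s' hx0 hxn hs hAx h
      have hVlen : s.1.length = M.length := hs.1
      have hAlen : s.2.1.length = M.length := hs.2.1
      simp only [pvVisit] at h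
      cases hf : pvVisitFold M v f ((M.getD x.toNat []).reverse) (pvMark v x s) with
      | none => rw [hf] at h; cases h
      | some s₂ =>
        rw [hf] at h
        cases h
        have hs₁ : pvSInv M (pvMark v x s) := by
          refine ⟨by simp [pvMark, hVlen], by simp [pvMark, hAlen], hs.2.2.1, ?_⟩
          intro j hj hVj
          simp only [pvMark] at hVj ⊢
          rcases eq_or_ne j x.toNat with rfl | hne
          · rw [pvGetD_set_self _ _ _ (by omega)] at hVj
            exact absurd hVj hv
          · rw [pvGetD_set_ne _ _ _ _ hne] at hVj
            exact hs.2.2.2 j hj hVj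
        have hrow : ∀ y ∈ (M.getD x.toNat []).reverse, 0 ≤ y ∧ y.toNat < M.length := by
          intro y hy
          rw [List.mem_reverse] at hy
          have hmem : M.getD x.toNat [] ∈ M := by
            rw [List.getD_eq_getElem M [] hxn]
            exact List.getElem_mem _
          have := hctx.2 _ hmem y hy
          exact ⟨this.1, by omega⟩
        have hrow' : ∀ y ∈ M.getD x.toNat [], 0 ≤ y ∧ y.toNat < M.length := by
          intro y hy
          exact hrow y (by rwa [List.mem_reverse])
        have hff := pvFoldFilter M v hctx f ((M.getD x.toNat []).reverse).length
          ((M.getD x.toNat []).reverse) (pvMark v x s) le_rfl hrow hs₁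
        rw [hff] at hf
        have hm₀ : ((M.getD x.toNat []).reverse).filter
              (fun y => (pvMark v x s).1.getD y.toNat 0 = -1) =
            ((M.getD x.toNat []).filter
              (fun y => (s.1.set x.toNat v).getD y.toNat 0 = -1)).reverse := by
          rw [List.filter_reverse]
          rfl
        rw [hm₀] at hf
        have hm₀r : ∀ y ∈ ((M.getD x.toNat []).filter
              (fun y => (s.1.set x.toNat v).getD y.toNat 0 = -1)).reverse,
            0 ≤ y ∧ y.toNat < M.length := by
          intro y hy
          rw [List.mem_reverse] at hy
          exact hrow' y (List.mem_of_mem_filter hy)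
        have hsync₀ : ∀ z ∈ ((M.getD x.toNat []).filter
              (fun y => (s.1.set x.toNat v).getD y.toNat 0 = -1)).reverse,
            (pvMark v x s).2.1.getD z.toNat 0 = -1 → (pvMark v x s).1.getD z.toNat 0 = -1 := by
          intro z hz _
          rw [List.mem_reverse] at hz
          have := List.of_mem_filter hz
          simpa [pvMark] using this
        obtain ⟨gQ, runQ, bndQ⟩ := (foldQ f ihf.1) _ _ _ hm₀r hsync₀ hs₁ hf
        have hpackF := (pvRefPack M v hctx f).2 _ _ _ hm₀r hs₁ hf
        obtain ⟨hs₂, hM1f, hM2f, hcf, hantif, hallf⟩ := hpackF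
        have hV₁x : (s.1.set x.toNat v).getD x.toNat 0 = v :=
          pvGetD_set_self _ _ _ (by omega)
        have hV₂x : s₂.1.getD x.toNat 0 = v := by
          have := (hM1f x.toNat hxn (by simp only [pvMark]; rw [hV₁x]; exact hv)).1
          simp only [pvMark] at this
          rw [this, hV₁x]
        have hA₂x : s₂.2.1.getD x.toNat 0 = -1 := by
          have := (hM1f x.toNat hxn (by simp only [pvMark]; rw [hV₁x]; exact hv)).2
          simp only [pvMark] at this
          rw [this]
          exact hAx
        by_cases hem : (M.getD x.toNat []).filter
            (fun y => (s.1.set x.toNat v).getD y.toNat 0 = -1) = []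
        · -- no fresh child: one iteration finishes x
          rw [hem] at hf
          simp only [List.reverse_nil, pvVisitFold] at hf
          cases hf
          refine ⟨1, ?_, ?_⟩
          · intro rest g'
            rw [show 1 + g' = g' + 1 by omega,
              pvAStep M v x rest s.1 s.2.1 s.2.2 g' hx0 hxn hVlen hAlen hAx hrow',
              if_pos hem]
            rfl
          · by_cases hfr : s.1.getD x.toNat 0 = -1
            · rw [if_pos hfr]
              have := pvW_mark M s.1 v x.toNat hxn hfr hv
              simp only [pvFin, pvMark]
              omega
            · rw [if_neg hfr]
              have := pvW_set_nonfresh M s.1 v x.toNat hfr hv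
              simp only [pvFin, pvMark]
              omega
        · -- some fresh children: push, process them, then finish x on re-top
          have hall : ∀ y ∈ M.getD x.toNat [], s₂.1.getD y.toNat 0 ≠ -1 := by
            intro y hy
            by_cases hfr : (s.1.set x.toNat v).getD y.toNat 0 = -1
            · exact hallf y (by rw [List.mem_reverse]; exact List.mem_filter.mpr ⟨hy, by simpa⟩)
            · intro hc
              have := hantif y.toNat (hrow' y hy).2 hc
              simp only [pvMark] at this
              exact hfr this
          have hfl₂ : (M.getD x.toNat []).filter
              (fun y => (s₂.1.set x.toNat v).getD y.toNat 0 = -1) = [] := by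
            rw [pvSetIdem s₂.1 x.toNat v hV₂x (by rw [hs₂.1]; exact hxn)]
            exact List.filter_eq_nil_iff.mpr (fun y hy => by simpa using hall y hy)
          refine ⟨gQ + 2, ?_, ?_⟩
          · intro rest g'
            calc pvALoop M v (gQ + 2 + g') (x :: rest) s.1 s.2.1 s.2.2
                = pvALoop M v ((gQ + (g' + 1)) + 1) (x :: rest) s.1 s.2.1 s.2.2 := by
                  rw [show gQ + 2 + g' = (gQ + (g' + 1)) + 1 by omega]
              _ = pvALoop M v (gQ + (g' + 1))
                    (((M.getD x.toNat []).filter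
                      (fun y => (s.1.set x.toNat v).getD y.toNat 0 = -1)).reverse ++ (x :: rest))
                    (s.1.set x.toNat v) s.2.1 s.2.2 := by
                  rw [pvAStep M v x rest s.1 s.2.1 s.2.2 _ hx0 hxn hVlen hAlen hAx hrow',
                    if_neg hem]
              _ = pvALoop M v (g' + 1) (x :: rest) s₂.1 s₂.2.1 s₂.2.2 := runQ (x :: rest) (g' + 1)
              _ = pvALoop M v g' rest s₂.1 (s₂.2.1.set x.toNat s₂.2.2) (s₂.2.2 + 1) := by
                  rw [pvAStep M v x rest s₂.1 s₂.2.1 s₂.2.2 g' hx0 hxn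
                      (by rw [hs₂.1]) (by rw [hs₂.2.1]) hA₂x hrow',
                    if_pos hfl₂,
                    pvSetIdem s₂.1 x.toNat v hV₂x (by rw [hs₂.1]; exact hxn)]
              _ = pvALoop M v g' rest (pvFin x s₂).1 (pvFin x s₂).2.1 (pvFin x s₂).2.2 := rfl
          · have hdeg : pvDeg M x = (M.getD x.toNat []).length := rfl
            have hlenfl : ((M.getD x.toNat []).filter
                (fun y => (s.1.set x.toNat v).getD y.toNat 0 = -1)).reverse.length ≤
                (M.getD x.toNat []).length := by
              rw [List.length_reverse]
              exact List.length_filter_le _ _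
            simp only [pvMark] at bndQ
            by_cases hfr : s.1.getD x.toNat 0 = -1
            · rw [if_pos hfr]
              have := pvW_mark M s.1 v x.toNat hxn hfr hv
              simp only [pvFin]
              omega
            · rw [if_neg hfr, hdeg]
              have := pvW_set_nonfresh M s.1 v x.toNat hfr hv
              simp only [pvFin]
              omega
    exact ⟨hPsucc, foldQ (f + 1) hPsucc⟩

-- ---- B simulates the reference DFS ----

-- one iteration of B's loop: exhausted frame pops and numbers its node
theorem pvBStepFin (M : List (List Int)) (v : Int) (x : Int) (rest : List (Int × Nat))
    (V A : List Int) (c : Int) (g : Nat) (hx0 : 0 ≤ x) (hxA : x.toNat < A.length) :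
    pvBLoop M v (g + 1) ((x, 0) :: rest) V A c =
      pvBLoop M v g rest V (A.set x.toNat c) (c + 1) := by
  simp only [pvBLoop]
  rw [pvSetSome A x c hx0 hxA]
  simp

-- one iteration of B's loop: examine the next (reversed-order) neighbour
theorem pvBStep (M : List (List Int)) (v : Int) (x : Int) (k' : Nat)
    (rest : List (Int × Nat)) (V A : List Int) (c : Int) (g : Nat)
    (hx0 : 0 ≤ x) (hxn : x.toNat < M.length)
    (hk : k' < (M.getD x.toNat []).length)
    (hy0 : 0 ≤ (M.getD x.toNat []).getD k' 0)
    (hyV : ((M.getD x.toNat []).getD k' 0).toNat < V.length)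
    (hyM : ((M.getD x.toNat []).getD k' 0).toNat < M.length) :
    pvBLoop M v (g + 1) ((x, k' + 1) :: rest) V A c =
      if V.getD ((M.getD x.toNat []).getD k' 0).toNat 0 = -1 then
        pvBLoop M v g
          (((M.getD x.toNat []).getD k' 0,
              (M.getD ((M.getD x.toNat []).getD k' 0).toNat []).length) :: (x, k') :: rest)
          (V.set ((M.getD x.toNat []).getD k' 0).toNat v) A c
      else pvBLoop M v g ((x, k') :: rest) V A c := by
  simp only [pvBLoop, if_neg (Nat.succ_ne_zero k')]
  rw [pvGetRowSome M x hx0 hxn]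
  dsimp only
  have hcast : ((k' + 1 : Nat) : Int) - 1 = (k' : Int) := by push_cast; omega
  rw [hcast, pvGetSome (M.getD x.toNat []) (k' : Int) (by omega) (by simpa using hk)]
  dsimp only
  simp only [Int.toNat_natCast]
  rw [pvGetSome V _ hy0 hyV]
  dsimp only
  by_cases hfr : V.getD ((M.getD x.toNat []).getD k' 0).toNat 0 = -1
  · rw [if_pos hfr, if_pos hfr,
      pvSetSome V _ v hy0 hyV, pvGetRowSome M _ hy0 hyM]
    rfl
  · rw [if_neg hfr, if_neg hfr]
    norm_num

theorem pvBSim (M : List (List Int)) (v : Int) (hctx : pvCtx M v) : ∀ f : Nat,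
    (∀ (x : Int) s s', 0 ≤ x → x.toNat < M.length → pvSInv M s →
        s.1.getD x.toNat 0 = -1 →
        pvVisit M v f x s = some s' →
        ∃ g : Nat,
          (∀ (rest : List (Int × Nat)) (g' : Nat),
            pvBLoop M v (g + g') ((x, pvDeg M x) :: rest) (s.1.set x.toNat v) s.2.1 s.2.2 =
              pvBLoop M v g' rest s'.1 s'.2.1 s'.2.2) ∧
          g + pvW M s'.1 + 2 ≤ pvW M s.1) ∧
    (∀ (x : Int) (k : Nat) s s', 0 ≤ x → x.toNat < M.length → k ≤ pvDeg M x →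
        pvSInv M s → s.1.getD x.toNat 0 ≠ -1 →
        pvVisitFold M v f (((M.getD x.toNat []).take k).reverse) s = some s' →
        ∃ g : Nat,
          (∀ (rest : List (Int × Nat)) (g' : Nat),
            pvBLoop M v (g + g') ((x, k) :: rest) s.1 s.2.1 s.2.2 =
              pvBLoop M v g' rest (pvFin x s').1 (pvFin x s').2.1 (pvFin x s').2.2) ∧
          g + pvW M s'.1 ≤ pvW M s.1 + k + 1) := by
  have hv : v ≠ -1 := hctx.1
  have hrowmem : ∀ x : Int, x.toNat < M.length → ∀ y ∈ M.getD x.toNat [],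
      0 ≤ y ∧ y.toNat < M.length := by
    intro x hxn y hy
    have hmem : M.getD x.toNat [] ∈ M := by
      rw [List.getD_eq_getElem M [] hxn]
      exact List.getElem_mem _
    have := hctx.2 _ hmem y hy
    exact ⟨this.1, by omega⟩
  -- the frame-part (QB) follows from the visit-part (PB) at the same fuel
  have frameQ : ∀ f : Nat,
      (∀ (x : Int) s s', 0 ≤ x → x.toNat < M.length → pvSInv M s →
        s.1.getD x.toNat 0 = -1 →
        pvVisit M v f x s = some s' →
        ∃ g : Nat,
          (∀ (rest : List (Int × Nat)) (g' : Nat),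
            pvBLoop M v (g + g') ((x, pvDeg M x) :: rest) (s.1.set x.toNat v) s.2.1 s.2.2 =
              pvBLoop M v g' rest s'.1 s'.2.1 s'.2.2) ∧
          g + pvW M s'.1 + 2 ≤ pvW M s.1) →
      (∀ (k : Nat) (x : Int) s s', 0 ≤ x → x.toNat < M.length → k ≤ pvDeg M x →
        pvSInv M s → s.1.getD x.toNat 0 ≠ -1 →
        pvVisitFold M v f (((M.getD x.toNat []).take k).reverse) s = some s' →
        ∃ g : Nat,
          (∀ (rest : List (Int × Nat)) (g' : Nat),
            pvBLoop M v (g + g') ((x, k) :: rest) s.1 s.2.1 s.2.2 =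
              pvBLoop M v g' rest (pvFin x s').1 (pvFin x s').2.1 (pvFin x s').2.2) ∧
          g + pvW M s'.1 ≤ pvW M s.1 + k + 1) := by
    intro f hP k
    induction k with
    | zero =>
      intro x s s' hx0 hxn _ hs _ h
      simp only [List.take_zero, List.reverse_nil, pvVisitFold] at h
      cases h
      refine ⟨1, ?_, by omega⟩
      intro rest g'
      rw [show 1 + g' = g' + 1 by omega,
        pvBStepFin M v x rest s.1 s.2.1 s.2.2 g' hx0 (by rw [hs.2.1]; exact hxn)]
      rfl
    | succ k ih =>
      intro x s s' hx0 hxn hk hs hVx h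
      have hkl : k < (M.getD x.toNat []).length := hk
      have htk : ((M.getD x.toNat []).take (k + 1)).reverse =
          (M.getD x.toNat []).getD k 0 :: ((M.getD x.toNat []).take k).reverse := by
        rw [List.take_succ, List.getElem?_eq_getElem hkl, List.getD_eq_getElem _ 0 hkl]
        simp
      rw [htk] at h
      set y := (M.getD x.toNat []).getD k 0 with hydef
      have hymem : y ∈ M.getD x.toNat [] := by
        rw [hydef, List.getD_eq_getElem _ 0 hkl]
        exact List.getElem_mem _
      have hy := hrowmem x hxn y hymem
      simp only [pvVisitFold] at h
      by_cases hfr : s.1.getD y.toNat 0 = -1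
      · rw [if_pos hfr] at h
        cases hv1 : pvVisit M v f y s with
        | none => rw [hv1] at h; cases h
        | some s₁ =>
          rw [hv1] at h
          obtain ⟨gP, runP, bndP⟩ := hP y s s₁ hy.1 hy.2 hs hfr hv1
          have hpack := (pvRefPack M v hctx f).1 y s s₁ hy.1 hy.2 hs hv1
          obtain ⟨hs₁, hM1v, hM2v, hVy, hAy₁, hcv, hantiv⟩ := hpack
          have hxy : x.toNat ≠ y.toNat := by
            intro he
            rw [he] at hVx
            exact hVx hfr
          have hVx₁ : s₁.1.getD x.toNat 0 ≠ -1 := by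
            rw [(hM1v x.toNat hxn hxy hVx).1]
            exact hVx
          obtain ⟨gQ, runQ, bndQ⟩ := ih x s₁ s' hx0 hxn (by omega) hs₁ hVx₁ h
          refine ⟨1 + gP + gQ, ?_, ?_⟩
          · intro rest g'
            calc pvBLoop M v (1 + gP + gQ + g') ((x, k + 1) :: rest) s.1 s.2.1 s.2.2
                = pvBLoop M v ((gP + (gQ + g')) + 1) ((x, k + 1) :: rest) s.1 s.2.1 s.2.2 := by
                  rw [show 1 + gP + gQ + g' = (gP + (gQ + g')) + 1 by omega]
              _ = pvBLoop M v (gP + (gQ + g'))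
                    ((y, (M.getD y.toNat []).length) :: (x, k) :: rest)
                    (s.1.set y.toNat v) s.2.1 s.2.2 := by
                  rw [pvBStep M v x k rest s.1 s.2.1 s.2.2 _ hx0 hxn hkl
                      (hydef ▸ hy.1) (by rw [hs.1]; exact (hydef ▸ hy.2)) (hydef ▸ hy.2),
                    if_pos (hydef ▸ hfr)]
              _ = pvBLoop M v (gQ + g') ((x, k) :: rest) s₁.1 s₁.2.1 s₁.2.2 :=
                  runP ((x, k) :: rest) (gQ + g')
              _ = pvBLoop M v g' rest (pvFin x s').1 (pvFin x s').2.1 (pvFin x s').2.2 :=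
                  runQ rest g'
          · omega
      · rw [if_neg hfr] at h
        obtain ⟨gQ, runQ, bndQ⟩ := ih x s s' hx0 hxn (by omega) hs hVx h
        refine ⟨1 + gQ, ?_, ?_⟩
        · intro rest g'
          calc pvBLoop M v (1 + gQ + g') ((x, k + 1) :: rest) s.1 s.2.1 s.2.2
              = pvBLoop M v ((gQ + g') + 1) ((x, k + 1) :: rest) s.1 s.2.1 s.2.2 := by
                rw [show 1 + gQ + g' = (gQ + g') + 1 by omega]
            _ = pvBLoop M v (gQ + g') ((x, k) :: rest) s.1 s.2.1 s.2.2 := by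
                rw [pvBStep M v x k rest s.1 s.2.1 s.2.2 _ hx0 hxn hkl
                    (hydef ▸ hy.1) (by rw [hs.1]; exact (hydef ▸ hy.2)) (hydef ▸ hy.2),
                  if_neg (hydef ▸ hfr)]
            _ = pvBLoop M v g' rest (pvFin x s').1 (pvFin x s').2.1 (pvFin x s').2.2 :=
                runQ rest g'
        · omega
  intro f
  induction f with
  | zero =>
    constructor
    · intro x s s' _ _ _ _ h
      simp [pvVisit] at h
    · intro x k s s' hx0 hxn hk hs hVx h
      exact (frameQ 0 (by intro x s s' _ _ _ _ h; simp [pvVisit] at h)) k x s s' hx0 hxn hk hs hVx h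
  | succ f ihf =>
    have hPsucc : ∀ (x : Int) s s', 0 ≤ x → x.toNat < M.length → pvSInv M s →
        s.1.getD x.toNat 0 = -1 →
        pvVisit M v (f + 1) x s = some s' →
        ∃ g : Nat,
          (∀ (rest : List (Int × Nat)) (g' : Nat),
            pvBLoop M v (g + g') ((x, pvDeg M x) :: rest) (s.1.set x.toNat v) s.2.1 s.2.2 =
              pvBLoop M v g' rest s'.1 s'.2.1 s'.2.2) ∧
          g + pvW M s'.1 + 2 ≤ pvW M s.1 := by
      intro x s s' hx0 hxn hs hfrx h
      simp only [pvVisit] at h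
      cases hf : pvVisitFold M v f ((M.getD x.toNat []).reverse) (pvMark v x s) with
      | none => rw [hf] at h; cases h
      | some s₂ =>
        rw [hf] at h
        cases h
        have hs₁ : pvSInv M (pvMark v x s) := by
          refine ⟨by simp [pvMark, hs.1], by simp [pvMark, hs.2.1], hs.2.2.1, ?_⟩
          intro j hj hVj
          simp only [pvMark] at hVj ⊢
          rcases eq_or_ne j x.toNat with rfl | hne
          · rw [pvGetD_set_self _ _ _ (by have := hs.1; omega)] at hVj
            exact absurd hVj hv
          · rw [pvGetD_set_ne _ _ _ _ hne] at hVj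
            exact hs.2.2.2 j hj hVj
        have htake : ((M.getD x.toNat []).take (pvDeg M x)).reverse =
            (M.getD x.toNat []).reverse := by
          rw [show pvDeg M x = (M.getD x.toNat []).length from rfl,
            List.take_of_length_le le_rfl]
        have hVx₁ : (pvMark v x s).1.getD x.toNat 0 ≠ -1 := by
          simp only [pvMark]
          rw [pvGetD_set_self _ _ _ (by have := hs.1; omega)]
          exact hv
        obtain ⟨gQ, runQ, bndQ⟩ := (frameQ f ihf.1) (pvDeg M x) x (pvMark v x s) s₂
          hx0 hxn le_rfl hs₁ hVx₁ (by rw [htake]; exact hf)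
        refine ⟨gQ, ?_, ?_⟩
        · intro rest g'
          exact runQ rest g'
        · have hw := pvW_mark M s.1 v x.toNat hxn hfrx hv
          simp only [pvMark, pvFin] at bndQ ⊢
          have : pvDeg M x = (M.getD x.toNat []).length := rfl
          omega
    exact ⟨hPsucc, fun x k s s' hx0 hxn hk hs hVx h =>
      (frameQ (f + 1) hPsucc) k x s s' hx0 hxn hk hs hVx h⟩

theorem pvSumLens : ∀ (M : List (List Int)),
    ∑ j ∈ Finset.range M.length, (M.getD j []).length = (M.map List.length).sum := by
  intro M
  induction M with
  | nil => simp
  | cons r M ih =>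
    rw [List.length_cons, Finset.sum_range_succ']
    simp only [List.getD_cons_succ, List.getD_cons_zero]
    rw [ih]
    simp [Nat.add_comm]

theorem pvWle (M : List (List Int)) (V : List Int) :
    pvW M V ≤ 3 * M.length + (M.map List.length).sum := by
  have h1 : pvW M V ≤ ∑ j ∈ Finset.range M.length, (3 + (M.getD j []).length) :=
    Finset.sum_le_sum (fun j _ => by split_ifs <;> omega)
  have h2 : ∑ j ∈ Finset.range M.length, (3 + (M.getD j []).length) =
      3 * M.length + ∑ j ∈ Finset.range M.length, (M.getD j []).length := by
    rw [Finset.sum_add_distrib, Finset.sum_const, Finset.card_range, smul_eq_mul]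
    omega
  rw [pvSumLens M] at h2
  omega

theorem pvDegLe (M : List (List Int)) (x : Int) (hxn : x.toNat < M.length) :
    pvDeg M x ≤ (M.map List.length).sum := by
  apply List.le_sum_of_mem
  rw [List.mem_map]
  refine ⟨M.getD x.toNat [], ?_, rfl⟩
  rw [List.getD_eq_getElem M [] hxn]
  exact List.getElem_mem _

-- ===== VERDICT (by name: the statement is the Claim_ definition above) =====
theorem dfs_numbering_py_spec : Claim_equal_dfs_numbering_py := by
  unfold Claim_equal_dfs_numbering_py Spec_dfs_numbering_py
  intro st M V ANS cnt v _ hpre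
  obtain ⟨hin, hdisj⟩ := hpre
  obtain ⟨a, ha⟩ : ∃ a, PySem.List.pyGet? ANS st = some a := by
    cases h : PySem.List.pyGet? ANS st with
    | none => rw [PySem.List.pyGet?_eq_none_iff] at h; exact absurd hin h
    | some a => exact ⟨a, rfl⟩
  have hgetD : PySem.List.pyGetD ANS st 0 = a := by simp [PySem.List.pyGetD, ha]
  by_cases hfast : a = -1
  · -- ANS[st] = -1 : the strict conditions must hold, and both loops run the DFS
    have hstrict := hdisj.resolve_left (by rw [hgetD, hfast]; simp)
    obtain ⟨hst0, hstn, hVlen, hAlen, hcnt, hvne, hedges, hsync⟩ := hstrict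
    have hstn' : st.toNat < M.length := by omega
    have hctx : pvCtx M v := ⟨hvne, hedges⟩
    have hs : pvSInv M (V, ANS, cnt) := ⟨hVlen, hAlen, hcnt, hsync⟩
    have hAx : ANS.getD st.toNat 0 = -1 := by
      have := pvGetSome ANS st hst0 (by omega)
      rw [this] at ha
      injection ha with ha'
      rw [ha', hfast]
    set E := (M.map List.length).sum with hE
    set F := 3 * M.length + 2 * E + 7 with hF
    have hWle : pvW M V ≤ F := by
      have := pvWle M V
      omega
    obtain ⟨s', hvis⟩ := (pvRefTotal M v hctx F).1 st (V, ANS, cnt) hst0 hstn' hs (Or.inl hWle)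
    -- A runs to s'
    obtain ⟨gA, runA, bndA⟩ :=
      (pvASim M v hctx (F + 1)).1 st (V, ANS, cnt) s' hst0 hstn' hs hAx hvis
    have hdegA : pvDeg M st ≤ E := pvDegLe M st hstn'
    dsimp only at bndA
    have hgA : gA ≤ F + 1 := by
      by_cases hfr : V.getD st.toNat 0 = -1
      · rw [if_pos hfr] at bndA
        have := pvW_mark M V v st.toNat hstn' hfr hvne
        omega
      · rw [if_neg hfr] at bndA
        have := pvWle M V
        omega
    have hA : dfs_numbering_py st M V ANS cnt v = s'.2.2 := by
      unfold dfs_numbering_py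
      rw [show 3 * M.length + 2 * (M.map List.length).sum + 8 = gA + (F + 1 - gA) by omega]
      rw [runA [] (F + 1 - gA)]
      rcases hg : F + 1 - gA with _ | g <;> simp [pvALoop]
    -- B runs to s'
    simp only [pvVisit] at hvis
    rcases hf2 : pvVisitFold M v F ((M.getD st.toNat []).reverse) (pvMark v st (V, ANS, cnt))
      with _ | s₂
    · rw [hf2] at hvis; cases hvis
    · rw [hf2] at hvis
      cases hvis
      have hs₁ : pvSInv M (pvMark v st (V, ANS, cnt)) := by
        refine ⟨by simp [pvMark, hVlen], by simp [pvMark, hAlen], hcnt, ?_⟩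
        intro j hj hVj
        simp only [pvMark] at hVj ⊢
        rcases eq_or_ne j st.toNat with rfl | hne
        · rw [pvGetD_set_self _ _ _ (by omega)] at hVj
          exact absurd hVj hvne
        · rw [pvGetD_set_ne _ _ _ _ hne] at hVj
          exact hsync j hj hVj
      have hVx₁ : (pvMark v st (V, ANS, cnt)).1.getD st.toNat 0 ≠ -1 := by
        simp only [pvMark]
        rw [pvGetD_set_self _ _ _ (by omega)]
        exact hvne
      have htake : (((M.getD st.toNat []).take (pvDeg M st)).reverse) =
          (M.getD st.toNat []).reverse := by
        rw [show pvDeg M st = (M.getD st.toNat []).length from rfl,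
          List.take_of_length_le le_rfl]
      obtain ⟨gB, runB, bndB⟩ := (pvBSim M v hctx F).2 st (pvDeg M st)
        (pvMark v st (V, ANS, cnt)) s₂ hst0 hstn' le_rfl hs₁ hVx₁ (by rw [htake]; exact hf2)
      have hbndB : gB + pvW M s₂.1 ≤ pvW M (V.set st.toNat v) + pvDeg M st + 1 := by
        simpa [pvMark] using bndB
      have hgB : gB ≤ F + 1 := by
        have h1 := pvW_markLe M V v st.toNat hvne hstn'
        have h2 := pvWle M V
        omega
      have hB : dfs_numbering_py_alt st M V ANS cnt v = (pvFin st s₂).2.2 := by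
        unfold dfs_numbering_py_alt
        rw [ha]
        dsimp only
        rw [if_neg (show ¬ (a ≠ -1) from fun h => h hfast),
          pvSetSome V st v hst0 (by omega), pvGetRowSome M st hst0 hstn']
        dsimp only
        have hrl : (M.getD st.toNat []).length = pvDeg M st := rfl
        rw [hrl, show 3 * M.length + 2 * (M.map List.length).sum + 8 = gB + (F + 1 - gB) by omega]
        have := runB [] (F + 1 - gB)
        simp only [pvMark] at this
        rw [this]
        rcases hg : F + 1 - gB with _ | g <;> simp [pvBLoop]
      rw [hA, hB]
  · -- fast path: ANS[st] ≠ -1, both sides return cnt unchanged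
    have hA : dfs_numbering_py st M V ANS cnt v = cnt := by
      unfold dfs_numbering_py
      rw [show 3 * M.length + 2 * (M.map List.length).sum + 8 =
        (3 * M.length + 2 * (M.map List.length).sum + 7) + 1 by omega]
      simp only [pvALoop]
      rw [ha]
      dsimp only
      rw [if_neg hfast]
    have hB : dfs_numbering_py_alt st M V ANS cnt v = cnt := by
      unfold dfs_numbering_py_alt
      rw [ha]
      dsimp only
      rw [if_pos hfast]
    rw [hA, hB]
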